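-- pv_equiv track=rewrite | github.com/StevenPvr/Praedixa | app-api/app/core/auth.py | _first_known_role
-- ===== SOURCE A (Python) =====
-- _KNOWN_ROLES = {
--     "super_admin",
--     "org_admin",
--     "hr_manager",
--     "manager",
--     "employee",
--     "viewer",
-- }
--
-- _ROLE_PRIORITY = (
--     "super_admin",
--     "org_admin",
--     "hr_manager",
--     "manager",
--     "employee",
--     "viewer",
-- )
--
-- def _first_known_role(candidates: list[str]) -> str | None:
--     if not candidates:
--         return None
--     for role in _ROLE_PRIORITY:
--         if role in candidates:
--             return role
--     for role in candidates:
--         if role in _KNOWN_ROLES: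
--             return role
--     return None
-- ===== SOURCE B (Python) =====
-- _KNOWN_ROLES = {
--     "super_admin",
--     "org_admin",
--     "hr_manager",
--     "manager",
--     "employee",
--     "viewer",
-- }
--
-- _ROLE_PRIORITY = (
--     "super_admin",
--     "org_admin",
--     "hr_manager",
--     "manager",
--     "employee",
--     "viewer",
-- )
--
--
-- def _first_known_role(candidates: list[str]) -> str | None:
--     priority = {role: i for i, role in enumerate(_ROLE_PRIORITY)}
--     present = [r for r in candidates if r in priority]
--     if not present:
--         return None
--     return min(present, key=priority.__getitem__)
-- ===== Notes on version B (the rewrite author's own statement) =====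
-- stated objective: faster
-- what changed: B scans the candidates once against a role->index table and min-selects the candidate with the smallest priority index, instead of A's scan of the fixed priority tuple with a full membership test into candidates per role (plus a dead second loop).
import Mathlib
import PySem

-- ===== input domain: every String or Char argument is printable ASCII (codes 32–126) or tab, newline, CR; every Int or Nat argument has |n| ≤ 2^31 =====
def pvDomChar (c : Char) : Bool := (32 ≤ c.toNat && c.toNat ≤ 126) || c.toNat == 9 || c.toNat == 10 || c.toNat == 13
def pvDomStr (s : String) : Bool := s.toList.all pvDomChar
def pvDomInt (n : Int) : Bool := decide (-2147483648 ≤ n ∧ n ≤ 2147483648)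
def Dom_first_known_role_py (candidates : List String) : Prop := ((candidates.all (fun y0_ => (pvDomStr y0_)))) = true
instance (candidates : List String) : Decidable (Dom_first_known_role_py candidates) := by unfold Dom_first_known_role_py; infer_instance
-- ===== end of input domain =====

-- B re-implements A by a single scan of the candidates against a role->index table with a key-min
-- selection, instead of A's scan of the fixed priority tuple with per-role membership tests
-- (A's second loop is dead code); equal results are proved for all inputs.


-- ===== PORT A =====
-- _ROLE_PRIORITY (a tuple, iterated in order)
def kROLES : List String := ["super_admin","org_admin","hr_manager","manager","employee","viewer"]
-- _KNOWN_ROLES (a Python set)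
def kKNOWN : PySem.Set String := PySem.Set.ofList ["super_admin","org_admin","hr_manager","manager","employee","viewer"]

def first_known_role_py (candidates : List String) : Option String :=
  if candidates = [] then none
  else
    match kROLES.find? (fun role => candidates.contains role) with
    | some r => some r
    | none => candidates.find? (fun role => kKNOWN.contains role)

-- ===== PORT B =====
-- priority = {role: i for i, role in enumerate(_ROLE_PRIORITY)}
def kPriority : PySem.Dict String Int :=
  (PySem.List.enumerate kROLES).foldl (fun d p => d.insert p.2 p.1) PySem.Dict.empty

def first_known_role_py_alt (candidates : List String) : Option String :=
  let present := candidates.filter (fun r => kPriority.contains r)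
  if present = [] then none
  else PySem.List.min? present (fun r => (kPriority.get? r).getD 0)

-- ===== PRECONDITION & SPEC =====
def Spec_first_known_role_py (candidates : List String) (out : Option String) : Prop := out = first_known_role_py_alt candidates
instance (candidates : List String) (out : Option String) : Decidable (Spec_first_known_role_py candidates out) := by unfold Spec_first_known_role_py; infer_instance

-- ===== CLAIM (what is proved, stated in full; the proofs are below) =====
def Claim_equal_first_known_role_py : Prop := ∀ (candidates : List String), Dom_first_known_role_py candidates → Spec_first_known_role_py candidates (first_known_role_py candidates)

-- ===== LEMMAS AND PROOFS =====

lemma kP_eq : kPriority = PySem.Dict.mk [("super_admin",(0:Int)),("org_admin",1),("hr_manager",2),("manager",3),("employee",4),("viewer",5)] := by rfl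

lemma mem_of_contains (r : String) (h : kPriority.contains r = true) :
    r = "super_admin" ∨ r = "org_admin" ∨ r = "hr_manager" ∨ r = "manager" ∨ r = "employee" ∨ r = "viewer" := by
  rw [kP_eq] at h
  simp [PySem.Dict.contains, beq_iff_eq] at h
  tauto

lemma known_iff (r : String) : kKNOWN.contains r = true ↔ kPriority.contains r = true := by
  constructor
  · intro h
    have h' : r ∈ (["super_admin","org_admin","hr_manager","manager","employee","viewer"] : List String) := by
      simpa [kKNOWN, PySem.Set.ofList] using h
    fin_cases h' <;> decide
  · intro h
    rcases mem_of_contains r h with h|h|h|h|h|h <;> subst h <;> decide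

theorem first_known_role_eq (c : List String) :
    first_known_role_py c = first_known_role_py_alt c := by
  unfold first_known_role_py first_known_role_py_alt
  simp only
  by_cases hne : c.filter (fun r => kPriority.contains r) = []
  · rw [if_pos hne]
    have hnc : ∀ r, kPriority.contains r = true → r ∉ c := by
      intro r h1 hrc
      have : r ∈ c.filter (fun r => kPriority.contains r) := List.mem_filter.mpr ⟨hrc, h1⟩
      rw [hne] at this
      exact absurd this (List.not_mem_nil)
    by_cases hc0 : c = []
    · rw [if_pos hc0]
    · rw [if_neg hc0]
      have hfind : kROLES.find? (fun role => c.contains role) = none := by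
        apply List.find?_eq_none.mpr
        intro x hx
        have h1 : kPriority.contains x = true := by fin_cases hx <;> decide
        simpa using hnc x h1
      rw [hfind]
      have : c.find? (fun role => kKNOWN.contains role) = none := by
        apply List.find?_eq_none.mpr
        intro x hx hk
        exact hnc x ((known_iff x).mp (by simpa using hk)) hx
      rw [this]
  · rw [if_neg hne]
    obtain ⟨m, hm⟩ : ∃ m, PySem.List.min? (c.filter (fun r => kPriority.contains r))
        (fun r => (kPriority.get? r).getD 0) = some m := by
      cases h : PySem.List.min? (c.filter (fun r => kPriority.contains r))
          (fun r => (kPriority.get? r).getD 0) with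
      | none => exact absurd ((PySem.List.min?_eq_none_iff _ _).mp h) hne
      | some m => exact ⟨m, rfl⟩
    rw [hm]
    have hmmem := PySem.List.min?_mem hm
    have hmin := PySem.List.min?_isMin hm
    obtain ⟨hmc, hmp⟩ := List.mem_filter.mp hmmem
    have hcne : c ≠ [] := by rintro rfl; exact absurd hmc (List.not_mem_nil)
    rw [if_neg hcne]
    have hnotin : ∀ ρ : String, kPriority.contains ρ = true →
        ¬ ((kPriority.get? m).getD 0 ≤ (kPriority.get? ρ).getD 0) → ρ ∉ c := by
      intro ρ h1 h2 hin
      exact h2 (hmin ρ (List.mem_filter.mpr ⟨hin, h1⟩))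
    rcases mem_of_contains m hmp with h|h|h|h|h|h <;> subst h
    · simp [kROLES, hmc]
    · simp [kROLES, List.find?, hmc, hnotin "super_admin" (by decide) (by decide)]
    · simp [kROLES, List.find?, hmc, hnotin "super_admin" (by decide) (by decide),
        hnotin "org_admin" (by decide) (by decide)]
    · simp [kROLES, List.find?, hmc, hnotin "super_admin" (by decide) (by decide),
        hnotin "org_admin" (by decide) (by decide), hnotin "hr_manager" (by decide) (by decide)]
    · simp [kROLES, List.find?, hmc, hnotin "super_admin" (by decide) (by decide),
        hnotin "org_admin" (by decide) (by decide), hnotin "hr_manager" (by decide) (by decide),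
        hnotin "manager" (by decide) (by decide)]
    · simp [kROLES, List.find?, hmc, hnotin "super_admin" (by decide) (by decide),
        hnotin "org_admin" (by decide) (by decide), hnotin "hr_manager" (by decide) (by decide),
        hnotin "manager" (by decide) (by decide), hnotin "employee" (by decide) (by decide)]

-- ===== VERDICT (by name: the statement is the Claim_ definition above) =====
theorem first_known_role_py_spec : Claim_equal_first_known_role_py := by
  intro c _
  unfold Spec_first_known_role_py
  exact first_known_role_eq c
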